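-- pv_equiv track=rewrite | github.com/polymonster/stub-format | stub_format.py | prev_delim
-- ===== SOURCE A (Python) =====
-- def prev_delim(text):
--     delims = ["\n", ";", "}"]
--     v = len(text)+1
--     for d in delims:
--         vv = text.rfind(d)
--         if vv < v and vv != -1:
--             v = vv
--     return v
-- ===== SOURCE B (Python) =====
-- def prev_delim(text):
--     # single backward pass: the first time each delimiter is met (scanning from
--     # the end) is its last occurrence; the final one recorded is the minimum.
--     seen = set()
--     ans = None
--     for i, ch in reversed(list(enumerate(text))):
--         if ch in "\n;}" and ch not in seen:
--             seen.add(ch)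
--             ans = i
--     return len(text) + 1 if ans is None else ans
-- ===== Notes on version B (the rewrite author's own statement) =====
-- stated objective: alternative
-- what changed: Replaced the three separate rfind scans (each scanning the whole text from the end) with a single backward pass over enumerate(text) that records each delimiter's last occurrence the first time it is met, keeping a seen-set; the last index recorded is the minimum.
import Mathlib
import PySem

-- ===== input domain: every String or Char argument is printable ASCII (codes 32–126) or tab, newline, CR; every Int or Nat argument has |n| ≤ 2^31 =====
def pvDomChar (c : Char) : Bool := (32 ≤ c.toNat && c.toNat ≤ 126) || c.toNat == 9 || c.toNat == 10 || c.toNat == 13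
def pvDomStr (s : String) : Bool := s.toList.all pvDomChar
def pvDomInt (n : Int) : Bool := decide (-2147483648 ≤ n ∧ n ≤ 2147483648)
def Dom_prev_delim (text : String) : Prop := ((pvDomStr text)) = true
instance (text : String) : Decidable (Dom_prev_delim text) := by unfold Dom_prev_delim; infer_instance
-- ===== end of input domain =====

-- B replaces A's three whole-text rfind scans by one backward pass that records each
-- delimiter's last occurrence on first sight (seen-set); objective: alternative algorithm.

-- ===== PORT A =====
def prev_delim (text : String) : Int :=
  let delims : List String := ["\n", ";", "}"]
  delims.foldl (fun v d =>
    let vv := PySem.Str.rfind text d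
    if vv < v ∧ vv ≠ -1 then vv else v) (PySem.Str.len text + 1)

-- ===== PORT B =====
-- `ch in "\n;}"` on a single char = membership of the char in the string's chars (exact)
def prev_delim_alt (text : String) : Int :=
  let res := ((PySem.List.enumerate text.toList 0).reverse).foldl
    (fun (st : PySem.Set Char × Option Int) p =>
      if p.2 ∈ "\n;}".toList ∧ ¬ (PySem.Set.contains st.1 p.2 = true) then
        (PySem.Set.add st.1 p.2, some p.1)
      else st)
    (PySem.Set.empty, none)
  match res.2 with
  | none => PySem.Str.len text + 1
  | some i => i

-- ===== PRECONDITION & SPEC =====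
def Spec_prev_delim (text : String) (out : Int) : Prop := out = prev_delim_alt text
instance (text : String) (out : Int) : Decidable (Spec_prev_delim text out) := by unfold Spec_prev_delim; infer_instance

-- ===== CLAIM (what is proved, stated in full; the proofs are below) =====
def Claim_equal_prev_delim : Prop := ∀ (text : String), Dom_prev_delim text → Spec_prev_delim text (prev_delim text)

-- ===== LEMMAS AND PROOFS =====

-- last-occurrence characterisation of Chars.rfind for a single-char needle
theorem pv_go_cons (c d : Char) (m : List Char) :
    ∀ j : Nat, PySem.Chars.rfind.go (c :: m) [d] (j + 1) =
      (if PySem.Chars.rfind.go m [d] j = -1 then (if c = d then 0 else -1)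
       else PySem.Chars.rfind.go m [d] j + 1) := by
  intro j
  induction j with
  | zero =>
      simp only [Nat.zero_add, PySem.Chars.rfind.go, List.drop_one, List.tail_cons]
      by_cases h : [d].isPrefixOf m
      · simp [h]
      · simp [h, List.isPrefixOf]
        by_cases hc : d = c
        · simp [hc]
        · simp [hc]; intro h'; exact absurd h'.symm hc
  | succ j ih =>
      rw [show PySem.Chars.rfind.go (c :: m) [d] (j + 1 + 1) =
            (if [d].isPrefixOf ((c :: m).drop (j + 1 + 1)) then ((j : Int) + 1 + 1)
             else PySem.Chars.rfind.go (c :: m) [d] (j + 1)) by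
          simp [PySem.Chars.rfind.go]]
      rw [show PySem.Chars.rfind.go m [d] (j + 1) =
            (if [d].isPrefixOf (m.drop (j + 1)) then ((j : Int) + 1)
             else PySem.Chars.rfind.go m [d] j) by
          simp [PySem.Chars.rfind.go]]
      by_cases h : [d].isPrefixOf (m.drop (j + 1))
      · simp [h]; omega
      · simp [h, ih]

theorem pv_rfind_nil (d : Char) : PySem.Chars.rfind [] [d] = -1 := by
  simp [PySem.Chars.rfind, PySem.Chars.rfind.go, List.isPrefixOf]

theorem pv_rfind_cons (c d : Char) (m : List Char) :
    PySem.Chars.rfind (c :: m) [d] =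
      (if PySem.Chars.rfind m [d] = -1 then (if c = d then 0 else -1)
       else PySem.Chars.rfind m [d] + 1) := by
  show PySem.Chars.rfind.go (c :: m) [d] (m.length + 1) = _
  exact pv_go_cons c d m m.length

theorem pv_rfind_bounds (d : Char) (m : List Char) :
    -1 ≤ PySem.Chars.rfind m [d] ∧ PySem.Chars.rfind m [d] < m.length := by
  induction m with
  | nil => simp [pv_rfind_nil]
  | cons c m ih =>
      rw [pv_rfind_cons]
      simp only [List.length_cons]
      push_cast
      split_ifs <;> omega

theorem pv_rfind_ne_iff (d : Char) (m : List Char) :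
    PySem.Chars.rfind m [d] ≠ -1 ↔ d ∈ m := by
  induction m with
  | nil => simp [pv_rfind_nil]
  | cons c m ih =>
      rw [pv_rfind_cons]
      have hb := pv_rfind_bounds d m
      by_cases h : PySem.Chars.rfind m [d] = -1
      · rw [if_pos h]
        have hdm : d ∉ m := fun hm => (ih.mpr hm) h
        by_cases hc : c = d
        · subst hc; simp
        · simp only [if_neg hc]
          simp [hdm]
          intro h'; exact absurd h'.symm hc
      · rw [if_neg h]
        have hdm : d ∈ m := ih.mp h
        simp [hdm]
        try omega

-- option-min of the (possibly absent) three last-occurrence indices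
def pvOnn (r : Int) : Option Int := if r = -1 then none else some r

def pvOmin : Option Int → Option Int → Option Int
  | none, b => b
  | some a, none => some a
  | some a, some b => some (if a ≤ b then a else b)

def pvRmin (m : List Char) : Option Int :=
  pvOmin (pvOmin (pvOnn (PySem.Chars.rfind m ['\n'])) (pvOnn (PySem.Chars.rfind m [';'])))
    (pvOnn (PySem.Chars.rfind m ['}']))

theorem pv_omin_map (a b : Option Int) :
    pvOmin (a.map (· + 1)) (b.map (· + 1)) = (pvOmin a b).map (· + 1) := by
  cases a <;> cases b <;> simp [pvOmin] <;> try (split_ifs <;> simp)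

theorem pv_onn_shift (c d : Char) (m : List Char)
    (h : c ≠ d ∨ PySem.Chars.rfind m [d] ≠ -1) :
    pvOnn (PySem.Chars.rfind (c :: m) [d]) = (pvOnn (PySem.Chars.rfind m [d])).map (· + 1) := by
  have hb := pv_rfind_bounds d m
  rw [pv_rfind_cons]
  by_cases hm : PySem.Chars.rfind m [d] = -1
  · rcases h with h | h
    · simp [hm, pvOnn, h]
    · exact absurd hm h
  · simp [hm, pvOnn]
    omega

-- B's backward scan as a function of the remaining prefix
def pvScan (m : List Char) (k : Int) : PySem.Set Char × Option Int :=
  ((PySem.List.enumerate m k).reverse).foldl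
    (fun (st : PySem.Set Char × Option Int) p =>
      if p.2 ∈ "\n;}".toList ∧ ¬ (PySem.Set.contains st.1 p.2 = true) then
        (PySem.Set.add st.1 p.2, some p.1)
      else st)
    (PySem.Set.empty, none)

theorem pv_scan_cons (c : Char) (m : List Char) (k : Int) :
    pvScan (c :: m) k =
      (if c ∈ "\n;}".toList ∧ ¬ (PySem.Set.contains (pvScan m (k + 1)).1 c = true) then
        (PySem.Set.add (pvScan m (k + 1)).1 c, some k)
      else pvScan m (k + 1)) := by
  simp [pvScan, PySem.List.enumerate_cons, List.foldl_append]

theorem pv_scan_spec (m : List Char) : ∀ k : Int,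
    (∀ x : Char, x ∈ (pvScan m k).1 ↔ x ∈ "\n;}".toList ∧ x ∈ m) ∧
    (pvScan m k).2 = (pvRmin m).map (fun r => k + r) := by
  induction m with
  | nil =>
      intro k
      constructor
      · intro x
        simp [pvScan, PySem.List.enumerate, PySem.Set.empty]
      · simp [pvScan, PySem.List.enumerate, pvRmin, pv_rfind_nil, pvOnn, pvOmin]
  | cons c m ih =>
      intro k
      obtain ⟨ihs, ihv⟩ := ih (k + 1)
      rw [pv_scan_cons]
      by_cases hrec : c ∈ "\n;}".toList ∧ ¬ (PySem.Set.contains (pvScan m (k + 1)).1 c = true)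
      · rw [if_pos hrec]
        -- c is a delimiter not occurring in m: record index k
        have hcm : c ∉ m := by
          intro hm
          exact hrec.2 ((PySem.Set.contains_iff _ _).mpr ((ihs c).mpr ⟨hrec.1, hm⟩))
        have hne : PySem.Chars.rfind m [c] = -1 := by
          by_contra h
          exact hcm ((pv_rfind_ne_iff c m).mp h)
        constructor
        · intro x
          show x ∈ PySem.Set.add (pvScan m (k+1)).1 c ↔ _
          rw [PySem.Set.mem_add, ihs x]
          constructor
          · rintro (⟨h1, h2⟩ | rfl)
            · exact ⟨h1, List.mem_cons_of_mem _ h2⟩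
            · exact ⟨hrec.1, List.mem_cons_self⟩
          · rintro ⟨h1, h2⟩
            rcases List.mem_cons.mp h2 with rfl | h2
            · exact Or.inr rfl
            · exact Or.inl ⟨h1, h2⟩
        · show some k = _
          -- show pvRmin (c :: m) = some 0
          have h0 : pvRmin (c :: m) = some 0 := by
            have hb1 := pv_rfind_bounds '\n' m
            have hb2 := pv_rfind_bounds ';' m
            have hb3 := pv_rfind_bounds '}' m
            have hdl : c = '\n' ∨ c = ';' ∨ c = '}' := by
              have e : ("\n;}".toList) = ['\n', ';', '}'] := rfl
              have h := hrec.1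
              rw [e] at h
              simpa using h
            rcases hdl with rfl | rfl | rfl <;>
              rw [pvRmin, pv_rfind_cons, pv_rfind_cons, pv_rfind_cons] <;>
                rw [if_pos hne] <;>
                  by_cases h2 : PySem.Chars.rfind m ['\n'] = -1 <;>
                    by_cases h3 : PySem.Chars.rfind m [';'] = -1 <;>
                      by_cases h4 : PySem.Chars.rfind m ['}'] = -1 <;>
                        simp_all [pvOnn, pvOmin] <;> split_ifs <;> simp_all <;> omega
          rw [h0]
          simp
      · rw [if_neg hrec]
        -- state unchanged; every component shifts by one
        have hsh : pvRmin (c :: m) = (pvRmin m).map (· + 1) := by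
          have h1 : ∀ d : Char, d ∈ "\n;}".toList →
              (c ≠ d ∨ PySem.Chars.rfind m [d] ≠ -1) := by
            intro d hd
            by_cases hcd : c = d
            · right
              subst hcd
              rw [pv_rfind_ne_iff]
              by_contra hcm
              exact hrec ⟨hd, fun hcon =>
                hcm (((ihs c).mp ((PySem.Set.contains_iff _ _).mp hcon)).2)⟩
            · exact Or.inl hcd
          rw [pvRmin, pvRmin,
            pv_onn_shift c '\n' m (h1 '\n' (by decide)),
            pv_onn_shift c ';' m (h1 ';' (by decide)),
            pv_onn_shift c '}' m (h1 '}' (by decide)),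
            pv_omin_map, pv_omin_map]
        constructor
        · intro x
          rw [ihs x]
          constructor
          · rintro ⟨h1, h2⟩; exact ⟨h1, List.mem_cons_of_mem _ h2⟩
          · rintro ⟨h1, h2⟩
            rcases List.mem_cons.mp h2 with rfl | h2
            · by_cases hsc : PySem.Set.contains (pvScan m (k + 1)).1 x = true
              · exact (ihs x).mp ((PySem.Set.contains_iff _ _).mp hsc)
              · exact absurd ⟨h1, hsc⟩ hrec
            · exact ⟨h1, h2⟩
        · rw [ihv, hsh]
          cases pvRmin m <;> simp
          omega

theorem pv_A_eq (text : String) :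
    prev_delim text =
      (match pvRmin text.toList with
       | none => (text.toList.length : Int) + 1
       | some r => r) := by
  have hb1 := pv_rfind_bounds '\n' text.toList
  have hb2 := pv_rfind_bounds ';' text.toList
  have hb3 := pv_rfind_bounds '}' text.toList
  simp only [prev_delim, List.foldl, PySem.Str.rfind_eq, PySem.Str.len_eq]
  have e1 : "\n".toList = ['\n'] := rfl
  have e2 : ";".toList = [';'] := rfl
  have e3 : "}".toList = ['}'] := rfl
  rw [e1, e2, e3]
  by_cases h1 : PySem.Chars.rfind text.toList ['\n'] = -1 <;>
    by_cases h2 : PySem.Chars.rfind text.toList [';'] = -1 <;>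
      by_cases h3 : PySem.Chars.rfind text.toList ['}'] = -1 <;>
        simp only [pvRmin, pvOnn, pvOmin, h1, h2, h3] <;>
          split_ifs <;> (try simp_all) <;> (try split_ifs) <;> omega

-- ===== VERDICT (by name: the statement is the Claim_ definition above) =====
theorem prev_delim_spec : Claim_equal_prev_delim := by
  intro text _
  unfold Spec_prev_delim
  rw [pv_A_eq]
  have h := (pv_scan_spec text.toList 0).2
  show _ = prev_delim_alt text
  unfold prev_delim_alt
  simp only [PySem.Str.len_eq]
  rw [show ((PySem.List.enumerate text.toList 0).reverse).foldl
        (fun (st : PySem.Set Char × Option Int) p =>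
          if p.2 ∈ "\n;}".toList ∧ ¬ (PySem.Set.contains st.1 p.2 = true) then
            (PySem.Set.add st.1 p.2, some p.1)
          else st)
        (PySem.Set.empty, none) = pvScan text.toList 0 from rfl]
  cases hr : pvRmin text.toList with
  | none => rw [h, hr]; simp
  | some r => rw [h, hr]; simp
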